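-- pv_equiv track=rewrite | github.com/Hamdy1234H/beam | prime_handoff.py | parse_clis
-- ===== SOURCE A (Python) =====
-- SUPPORTED_CLIS = ("codex", "kimi", "opencode", "pi", "claude", "amp")
--
-- CLI_ALIASES = {
--     "claude-code": "claude",
--     "claudecode": "claude",
-- }
--
-- def parse_csv_list(raw: str, *, lower: bool = True) -> list[str]:
--     values = []
--     for part in raw.split(","):
--         value = part.strip()
--         if not value:
--             continue
--         values.append(value.lower() if lower else value)
--     return values
--
-- def parse_clis(raw: str) -> list[str]:
--     parsed_raw = parse_csv_list(raw)
--     parsed = [CLI_ALIASES.get(cli, cli) for cli in parsed_raw]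
--     unsupported = [cli for cli in parsed if cli not in SUPPORTED_CLIS]
--     if unsupported:
--         supported = ", ".join(SUPPORTED_CLIS)
--         raise RuntimeError(
--             f"Unsupported value(s) in --clis: {', '.join(unsupported)}. "
--             f"Supported values: {supported}"
--         )
--     # Keep order, remove duplicates.
--     deduped: list[str] = []
--     for cli in parsed:
--         if cli not in deduped:
--             deduped.append(cli)
--     return deduped
-- ===== SOURCE B (Python) =====
-- SUPPORTED_CLIS = ("codex", "kimi", "opencode", "pi", "claude", "amp")
--
-- CLI_ALIASES = {
--     "claude-code": "claude",
--     "claudecode": "claude",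
-- }
--
-- def parse_clis(raw: str) -> list[str]:
--     # Single pass: strip/lower/alias each token, collect unsupported ones,
--     # dedupe supported ones with a seen-set as we go.
--     out: list[str] = []
--     seen: set[str] = set()
--     unsupported: list[str] = []
--     for part in raw.split(","):
--         value = part.strip()
--         if not value:
--             continue
--         lowered = value.lower()
--         cli = CLI_ALIASES.get(lowered, lowered)
--         if cli not in SUPPORTED_CLIS:
--             unsupported.append(cli)
--         elif cli not in seen:
--             seen.add(cli)
--             out.append(cli)
--     if unsupported:
--         supported = ", ".join(SUPPORTED_CLIS)
--         raise RuntimeError(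
--             f"Unsupported value(s) in --clis: {', '.join(unsupported)}. "
--             f"Supported values: {supported}"
--         )
--     return out
-- ===== Notes on version B (the rewrite author's own statement) =====
-- stated objective: simpler
-- what changed: Fused A's four passes (CSV-parse helper, alias-map comprehension, unsupported-filter comprehension, dedup loop with a linear rescan of the output) into one loop over the comma-separated parts that strips/lowers/aliases each token and dedupes with a seen-set.
import Mathlib
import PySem

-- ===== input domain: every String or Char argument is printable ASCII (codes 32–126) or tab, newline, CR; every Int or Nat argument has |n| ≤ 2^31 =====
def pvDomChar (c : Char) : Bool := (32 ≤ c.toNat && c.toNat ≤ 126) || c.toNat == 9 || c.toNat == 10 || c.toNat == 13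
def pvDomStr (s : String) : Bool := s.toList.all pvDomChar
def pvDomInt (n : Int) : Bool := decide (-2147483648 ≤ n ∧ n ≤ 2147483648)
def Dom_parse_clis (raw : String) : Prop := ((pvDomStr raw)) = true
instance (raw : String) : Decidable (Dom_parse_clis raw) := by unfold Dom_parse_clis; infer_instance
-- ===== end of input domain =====

-- B fuses A's four passes (CSV helper, alias map, unsupported filter, dedup loop) into one loop with a seen-set; objective: simpler.
-- On inputs containing an unsupported token both Pythons raise RuntimeError; those inputs are outside Pre_ (both ports return [] there).

-- raw.split(",") — sep is the non-empty literal ",", so split? always returns some (exact)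
def pySplitComma (raw : String) : List String := (PySem.Str.split? raw ",").getD []

-- ===== PORT A =====
def pySupported : List String := ["codex", "kimi", "opencode", "pi", "claude", "amp"]

def pyAliases : PySem.Dict String String :=
  (PySem.Dict.empty.insert "claude-code" "claude").insert "claudecode" "claude"

def parse_csv_list (raw : String) (lower : Bool) : List String :=
  (pySplitComma raw).foldl
    (fun values part =>
      let value := PySem.Str.strip part
      if value = "" then values
      else values ++ [if lower then PySem.Str.lower value else value]) []

def parse_clis (raw : String) : List String :=
  let parsed_raw := parse_csv_list raw true
  let parsed := parsed_raw.map (fun cli => pyAliases.getD cli cli)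
  let unsupported := parsed.filter (fun cli => !(pySupported.contains cli))
  if unsupported = [] then
    parsed.foldl (fun deduped cli =>
      if deduped.contains cli then deduped else deduped ++ [cli]) []
  else []  -- Python raises RuntimeError here; excluded by Pre_parse_clis

-- ===== PORT B =====
-- loop body of Source B's single pass; state = (out, seen, unsupported)
def bStep (st : List String × PySem.Set String × List String) (part : String) :
    List String × PySem.Set String × List String :=
  let value := PySem.Str.strip part
  if value = "" then st
  else
    let lowered := PySem.Str.lower value
    let cli := pyAliases.getD lowered lowered
    if !(pySupported.contains cli) then (st.1, st.2.1, st.2.2 ++ [cli])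
    else if PySem.Set.contains st.2.1 cli then st
    else (st.1 ++ [cli], PySem.Set.add st.2.1 cli, st.2.2)

def parse_clis_alt (raw : String) : List String :=
  let st := (pySplitComma raw).foldl bStep ([], PySem.Set.empty, [])
  if st.2.2 = [] then st.1 else []  -- Python raises RuntimeError here; excluded by Pre_parse_clis

-- ===== PRECONDITION & SPEC =====
-- Pre_ excludes exactly the inputs with an unsupported token, on which both Pythons raise RuntimeError.
def Pre_parse_clis (raw : String) : Prop :=
  ∀ part ∈ pySplitComma raw,
    PySem.Str.strip part = "" ∨
      pyAliases.getD (PySem.Str.lower (PySem.Str.strip part))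
        (PySem.Str.lower (PySem.Str.strip part)) ∈ pySupported
instance (raw : String) : Decidable (Pre_parse_clis raw) := by unfold Pre_parse_clis; infer_instance

def pvWitness_parse_clis : String := "Codex, claude-code,codex , amp"

def Spec_parse_clis (raw : String) (out : List String) : Prop := out = parse_clis_alt raw
instance (raw : String) (out : List String) : Decidable (Spec_parse_clis raw out) := by unfold Spec_parse_clis; infer_instance

-- ===== CLAIM (what is proved, stated in full; the proofs are below) =====
def Claim_equal_parse_clis : Prop := ∀ (raw : String), Dom_parse_clis raw → Pre_parse_clis raw → Spec_parse_clis raw (parse_clis raw)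

-- ===== LEMMAS AND PROOFS =====

-- the per-token processing both programs perform (none = token stripped to empty)
def procOne (part : String) : Option String :=
  if PySem.Str.strip part = "" then none
  else some (pyAliases.getD (PySem.Str.lower (PySem.Str.strip part))
              (PySem.Str.lower (PySem.Str.strip part)))

theorem csv_fold_eq (f : List String → String → List String)
    (hf : ∀ vs p, f vs p = if PySem.Str.strip p = "" then vs
        else vs ++ [PySem.Str.lower (PySem.Str.strip p)])
    (parts : List String) : ∀ acc : List String,
    parts.foldl f acc
      = acc ++ parts.filterMap
          (fun p => if PySem.Str.strip p = "" then none
                    else some (PySem.Str.lower (PySem.Str.strip p))) := by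
  induction parts with
  | nil => intro acc; simp
  | cons p ps ih =>
    intro acc
    simp only [List.foldl_cons, List.filterMap_cons, hf]
    by_cases h : PySem.Str.strip p = ""
    · simp only [h, reduceIte, ih]
    · simp only [if_neg h, ih, List.append_assoc, List.singleton_append]

theorem parsed_eq (raw : String) :
    (parse_csv_list raw true).map (fun cli => pyAliases.getD cli cli)
      = (pySplitComma raw).filterMap procOne := by
  unfold parse_csv_list
  rw [csv_fold_eq (hf := fun vs p => by by_cases h : PySem.Str.strip p = "" <;> simp [h]),
      List.nil_append, List.map_filterMap]
  apply List.filterMap_congr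
  intro p _
  unfold procOne
  by_cases h : PySem.Str.strip p = "" <;> simp [h]

theorem bStep_empty (st : List String × PySem.Set String × List String) (p : String)
    (h : PySem.Str.strip p = "") : bStep st p = st := by
  simp [bStep, h]

theorem bStep_supported (out : List String) (seen : PySem.Set String) (uns : List String)
    (p : String) (hne : ¬ PySem.Str.strip p = "")
    (hsup : pyAliases.getD (PySem.Str.lower (PySem.Str.strip p))
        (PySem.Str.lower (PySem.Str.strip p)) ∈ pySupported) :
    bStep (out, seen, uns) p =
      (let cli := pyAliases.getD (PySem.Str.lower (PySem.Str.strip p))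
          (PySem.Str.lower (PySem.Str.strip p));
       if seen.contains cli then (out, seen, uns)
       else (out ++ [cli], seen.add cli, uns)) := by
  have hb : (!pySupported.contains
      (pyAliases.getD (PySem.Str.lower (PySem.Str.strip p))
        (PySem.Str.lower (PySem.Str.strip p)))) = false := by
    simpa using hsup
  simp only [bStep, if_neg hne, hb, Bool.false_eq_true, if_false]

theorem bfold_eq (parts : List String)
    (hp : ∀ p ∈ parts, PySem.Str.strip p = "" ∨
      pyAliases.getD (PySem.Str.lower (PySem.Str.strip p))
        (PySem.Str.lower (PySem.Str.strip p)) ∈ pySupported) :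
    ∀ out : List String,
    parts.foldl bStep (out, PySem.Set.ofList out, ([] : List String))
      = ((parts.filterMap procOne).foldl
          (fun deduped cli => if deduped.contains cli then deduped else deduped ++ [cli]) out,
         PySem.Set.ofList ((parts.filterMap procOne).foldl
          (fun deduped cli => if deduped.contains cli then deduped else deduped ++ [cli]) out),
         ([] : List String)) := by
  induction parts with
  | nil => intro out; simp
  | cons p ps ih =>
    intro out
    have hps : ∀ q ∈ ps, PySem.Str.strip q = "" ∨
        pyAliases.getD (PySem.Str.lower (PySem.Str.strip q))
          (PySem.Str.lower (PySem.Str.strip q)) ∈ pySupported :=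
      fun q hq => hp q (List.mem_cons_of_mem _ hq)
    simp only [List.foldl_cons, List.filterMap_cons]
    by_cases h : PySem.Str.strip p = ""
    · rw [bStep_empty _ _ h]
      simp only [procOne, if_pos h]
      exact ih hps out
    · have hsup := (hp p List.mem_cons_self).resolve_left h
      rw [bStep_supported _ _ _ _ h hsup]
      simp only [procOne, if_neg h]
      set cli := pyAliases.getD (PySem.Str.lower (PySem.Str.strip p))
        (PySem.Str.lower (PySem.Str.strip p)) with hcli
      simp only [List.foldl_cons]
      by_cases hmem : cli ∈ out
      · have hc1 : PySem.Set.contains (PySem.Set.ofList out) cli = true := by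
          rw [PySem.Set.contains_iff, PySem.Set.mem_ofList]; exact hmem
        have hc2 : out.contains cli = true := List.contains_iff_mem.mpr hmem
        rw [hc1]
        simp only [hc2]
        simpa using ih hps out
      · have hc1 : PySem.Set.contains (PySem.Set.ofList out) cli = false := by
          rw [← Bool.not_eq_true, PySem.Set.contains_iff, PySem.Set.mem_ofList]
          exact hmem
        have hc2 : out.contains cli = false := by
          rw [← Bool.not_eq_true, List.contains_iff_mem]; exact hmem
        rw [hc1]
        simp only [Bool.false_eq_true, if_false, hc2]
        rw [← PySem.Set.ofList_append_singleton]
        exact ih hps (out ++ [cli])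

-- ===== VERDICT (by name: the statement is the Claim_ definition above) =====
theorem parse_clis_spec : Claim_equal_parse_clis := by
  intro raw _ hpre
  unfold Spec_parse_clis
  simp only [parse_clis, parse_clis_alt]
  rw [parsed_eq]
  have hempty :
      ((pySplitComma raw).filterMap procOne).filter
        (fun cli => !(pySupported.contains cli)) = [] := by
    rw [List.filter_eq_nil_iff]
    intro c hc
    obtain ⟨p, hp, hpc⟩ := List.mem_filterMap.mp hc
    by_cases h : PySem.Str.strip p = ""
    · simp [procOne, h] at hpc
    · have hsup := (hpre p hp).resolve_left h
      simp only [procOne, if_neg h, Option.some_inj] at hpc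
      subst hpc
      simpa using hsup
  rw [hempty, if_pos rfl]
  rw [show (PySem.Set.empty : PySem.Set String) = PySem.Set.ofList [] from rfl]
  rw [bfold_eq (pySplitComma raw) hpre []]
  simp
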